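-- pv_equiv track=rewrite | github.com/sudd-bot/alert311 | backend/app/services/address_utils.py | normalize_addr
-- ===== SOURCE A (Python) =====
-- def normalize_addr(a: str) -> str:
--     """
--     Normalize street-type abbreviations for address fuzzy matching.
--     Covers 13 common street types, applied symmetrically to both query and ticket address.
--     Defined at module level so it's compiled once at import time (not per-request).
--
--     Examples:
--         "580 California Street, San Francisco, CA" → "580 california st san francisco ca"
--         "580 California St"                         → "580 california st"
--     """
--     a = a.lower().strip()
--     # Remove punctuation
--     a = a.replace(".", "").replace(",", "")
--     # Full → abbreviated (longer strings first to avoid partial matches)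
--     replacements = [
--         (" boulevard", " blvd"),
--         (" terrace", " ter"),
--         (" avenue", " ave"),
--         (" street", " st"),
--         (" drive", " dr"),
--         (" court", " ct"),
--         (" place", " pl"),
--         (" lane", " ln"),
--         (" road", " rd"),
--         (" circle", " cir"),
--         (" highway", " hwy"),
--         (" parkway", " pkwy"),
--         (" square", " sq"),
--     ]
--     for full, abbr in replacements:
--         a = a.replace(full, abbr)
--     return a
-- ===== SOURCE B (Python) =====
-- _ABBREV = {
--     "boulevard": "blvd",
--     "terrace": "ter",
--     "avenue": "ave",
--     "street": "st",
--     "drive": "dr",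
--     "court": "ct",
--     "place": "pl",
--     "lane": "ln",
--     "road": "rd",
--     "circle": "cir",
--     "highway": "hwy",
--     "parkway": "pkwy",
--     "square": "sq",
-- }
--
--
-- def normalize_addr(a: str) -> str:
--     a = a.lower().strip()
--     a = "".join(c for c in a if c not in ".,")
--     out = []
--     i, n = 0, len(a)
--     while i < n:
--         c = a[i]
--         out.append(c)
--         i += 1
--         if c == " ":
--             for word, abbr in _ABBREV.items():
--                 if a.startswith(word, i):
--                     out.append(abbr)
--                     i += len(word)
--                     break
--     return "".join(out)
-- ===== Notes on version B (the rewrite author's own statement) =====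
-- stated objective: alternative
-- what changed: Replaces A's 13 sequential full-string .replace passes with one left-to-right scan that, at each space, looks the following street word up in a table and emits its abbreviation; algorithmically one pass instead of 13, though in CPython A's C-level str.replace is faster in wall time.
import Mathlib
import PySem

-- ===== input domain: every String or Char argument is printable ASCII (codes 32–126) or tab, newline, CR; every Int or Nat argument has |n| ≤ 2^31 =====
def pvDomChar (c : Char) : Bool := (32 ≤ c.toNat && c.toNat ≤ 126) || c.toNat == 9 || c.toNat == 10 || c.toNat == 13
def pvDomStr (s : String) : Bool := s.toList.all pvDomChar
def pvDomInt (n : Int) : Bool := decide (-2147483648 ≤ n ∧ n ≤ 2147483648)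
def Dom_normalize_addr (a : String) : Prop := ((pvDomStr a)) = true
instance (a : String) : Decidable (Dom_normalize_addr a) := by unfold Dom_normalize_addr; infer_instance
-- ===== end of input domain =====

-- B replaces A's 13 sequential full-string replace passes by a single left-to-right scan
-- over a word→abbreviation table (an alternative one-pass algorithm; return values proved equal).

-- ===== PORT A =====
def normalize_addr (a : String) : String :=
  let a1 := PySem.Str.strip (PySem.Str.lower a)
  let a2 := PySem.Str.replace (PySem.Str.replace a1 "." "") "," ""
  let replacements : List (String × String) :=
    [(" boulevard", " blvd"), (" terrace", " ter"), (" avenue", " ave"), (" street", " st"),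
     (" drive", " dr"), (" court", " ct"), (" place", " pl"), (" lane", " ln"),
     (" road", " rd"), (" circle", " cir"), (" highway", " hwy"), (" parkway", " pkwy"),
     (" square", " sq")]
  replacements.foldl (fun s p => PySem.Str.replace s p.1 p.2) a2

-- ===== PORT B =====
-- the module-level dict _ABBREV of Source B (word → abbreviation, insertion order)
def abbrevTable : List (List Char × List Char) :=
  [("boulevard".toList, "blvd".toList), ("terrace".toList, "ter".toList),
   ("avenue".toList, "ave".toList), ("street".toList, "st".toList),
   ("drive".toList, "dr".toList), ("court".toList, "ct".toList),
   ("place".toList, "pl".toList), ("lane".toList, "ln".toList),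
   ("road".toList, "rd".toList), ("circle".toList, "cir".toList),
   ("highway".toList, "hwy".toList), ("parkway".toList, "pkwy".toList),
   ("square".toList, "sq".toList)]

-- Source B's while loop: copy each char; after a space, if some table word follows,
-- emit its abbreviation and skip past the word
def scanGo (tbl : List (List Char × List Char)) : List Char → List Char
  | [] => []
  | c :: rest =>
    if c = ' ' then
      match tbl.find? (fun p => p.1.isPrefixOf rest) with
      | some p => c :: (p.2 ++ scanGo tbl (rest.drop p.1.length))
      | none => c :: scanGo tbl rest
    else c :: scanGo tbl rest
termination_by l => l.length
decreasing_by all_goals first | (simp [List.length_drop]; omega) | simp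

def normalize_addr_alt (a : String) : String :=
  let a1 := PySem.Str.strip (PySem.Str.lower a)
  let a2 := a1.toList.filter (fun c => !(c == '.' || c == ','))
  String.ofList (scanGo abbrevTable a2)

-- ===== PRECONDITION & SPEC =====
def Spec_normalize_addr (a : String) (out : String) : Prop := out = normalize_addr_alt a
instance (a : String) (out : String) : Decidable (Spec_normalize_addr a out) := by unfold Spec_normalize_addr; infer_instance

-- ===== CLAIM (what is proved, stated in full; the proofs are below) =====
def Claim_equal_normalize_addr : Prop := ∀ (a : String), Dom_normalize_addr a → Spec_normalize_addr a (normalize_addr a)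

-- ===== LEMMAS AND PROOFS =====

-- fuel-free reformulation of PySem.Chars.replace (for a nonempty pattern)
def repl (old new : List Char) : List Char → List Char
  | [] => []
  | c :: t =>
    if old.isPrefixOf (c :: t) then new ++ repl old new (t.drop (old.length - 1))
    else c :: repl old new t
termination_by l => l.length
decreasing_by all_goals first | (simp [List.length_drop]; omega) | simp

theorem replace_go_eq (old new : List Char) (hold : old ≠ []) :
    ∀ fuel l acc, l.length ≤ fuel →
      PySem.Chars.replace.go old new fuel l acc = acc.reverse ++ repl old new l := by
  intro fuel
  induction fuel with
  | zero =>
    intro l acc h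
    have hl : l = [] := List.eq_nil_of_length_eq_zero (Nat.le_zero.mp h)
    subst hl
    simp [PySem.Chars.replace.go, repl]
  | succ n ih =>
    intro l acc h
    match l with
    | [] => simp [PySem.Chars.replace.go, repl]
    | c :: t =>
      rw [PySem.Chars.replace.go]
      by_cases hp : old.isPrefixOf (c :: t)
      · obtain ⟨o, os, rfl⟩ : ∃ o os, old = o :: os := by
          cases old with | nil => exact absurd rfl hold | cons o os => exact ⟨o, os, rfl⟩
        simp only [hp, if_true]
        rw [ih _ _ (by simp only [List.length_drop, List.length_cons] at *; omega)]
        rw [repl]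
        simp [hp, List.drop_succ_cons]
      · simp only [hp]
        rw [if_neg (by simp [hp]), ih _ _ (by simpa using h)]
        rw [repl]
        simp [hp]

theorem replace_eq_repl (old new s : List Char) (hold : old ≠ []) :
    PySem.Chars.replace s old new = repl old new s := by
  rw [PySem.Chars.replace, if_neg (by simpa using hold)]
  simpa using replace_go_eq old new hold s.length s [] le_rfl

theorem replace_eq_repl' (o : Char) (os new s : List Char) :
    PySem.Chars.replace s (o :: os) new = repl (o :: os) new s := replace_eq_repl _ _ _ (by simp)

theorem repl_single_empty (c0 : Char) : ∀ s, repl [c0] [] s = s.filter (fun c => !(c == c0)) := by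
  intro s
  induction s with
  | nil => simp [repl]
  | cons c t ih =>
    rw [repl]
    by_cases h : c = c0
    · subst h; simp [List.isPrefixOf, ih, List.filter]
    · simp [List.isPrefixOf, Ne.symm h, ih, List.filter_cons, h]

theorem repl_nil (old new : List Char) : repl old new [] = [] := by rw [repl]

theorem repl_cons (old new : List Char) (c : Char) (t : List Char) :
    repl old new (c :: t) =
      if old.isPrefixOf (c :: t) then new ++ repl old new (t.drop (old.length - 1))
      else c :: repl old new t := by rw [repl]

theorem scanGo_nil (tbl : List (List Char × List Char)) : scanGo tbl [] = [] := by rw [scanGo]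

theorem scanGo_cons (tbl : List (List Char × List Char)) (c : Char) (rest : List Char) :
    scanGo tbl (c :: rest) =
      if c = ' ' then
        match tbl.find? (fun p => p.1.isPrefixOf rest) with
        | some p => c :: (p.2 ++ scanGo tbl (rest.drop p.1.length))
        | none => c :: scanGo tbl rest
      else c :: scanGo tbl rest := by rw [scanGo]

theorem scanGo_cons_nonspace (tbl : List (List Char × List Char)) (c : Char) (hc : c ≠ ' ')
    (rest : List Char) : scanGo tbl (c :: rest) = c :: scanGo tbl rest := by
  rw [scanGo_cons, if_neg hc]

theorem scanGo_space_some (tbl : List (List Char × List Char)) (rest : List Char)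
    (p : List Char × List Char) (h : tbl.find? (fun q => q.1.isPrefixOf rest) = some p) :
    scanGo tbl (' ' :: rest) = ' ' :: (p.2 ++ scanGo tbl (rest.drop p.1.length)) := by
  rw [scanGo_cons, if_pos rfl, h]

theorem scanGo_space_none (tbl : List (List Char × List Char)) (rest : List Char)
    (h : tbl.find? (fun q => q.1.isPrefixOf rest) = none) :
    scanGo tbl (' ' :: rest) = ' ' :: scanGo tbl rest := by
  rw [scanGo_cons, if_pos rfl, h]

theorem scanGo_nil_table : ∀ s, scanGo [] s = s := by
  intro s
  induction s with
  | nil => exact scanGo_nil []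
  | cons c t ih =>
    rw [scanGo_cons]
    simp [List.find?, ih]

theorem scanGo_spacefree_append (tbl : List (List Char × List Char)) :
    ∀ m v, ' ' ∉ m → scanGo tbl (m ++ v) = m ++ scanGo tbl v := by
  intro m
  induction m with
  | nil => simp
  | cons x m ih =>
    intro v hsp
    have hx : x ≠ ' ' := fun h => hsp (by simp [h])
    rw [List.cons_append, scanGo_cons_nonspace tbl x hx, ih v (fun h => hsp (List.mem_cons_of_mem _ h))]
    rfl

theorem prefix_repl_iff (w b : List Char) :
    ∀ t w', w' ≠ [] → ' ' ∉ w' →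
      (w' <+: repl (' ' :: w) (' ' :: b) t ↔ w' <+: t) := by
  intro t
  induction t with
  | nil => intro w' hne _; simp [repl]
  | cons c t ih =>
    intro w' hne hsp
    obtain ⟨x, w'', rfl⟩ : ∃ x w'', w' = x :: w'' := by
      cases w' with | nil => exact absurd rfl hne | cons x w'' => exact ⟨x, w'', rfl⟩
    have hx : x ≠ ' ' := by intro h; exact hsp (by simp [h])
    rw [repl]
    by_cases hp : (' ' :: w).isPrefixOf (c :: t)
    · have hc : c = ' ' := by
        have := (List.isPrefixOf_iff_prefix.mp hp)
        exact ((List.cons_prefix_cons.mp this).1).symm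
      simp only [hp, if_true]
      constructor
      · intro h
        exact absurd ((List.cons_prefix_cons.mp h).1) hx
      · intro h
        exact absurd ((List.cons_prefix_cons.mp h).1) (hc ▸ hx)
    · rw [if_neg hp]
      rw [List.cons_prefix_cons, List.cons_prefix_cons]
      cases w'' with
      | nil => simp
      | cons y w₃ =>
        have : ' ' ∉ y :: w₃ := fun h => hsp (List.mem_cons_of_mem _ h)
        rw [ih (y :: w₃) (by simp) this]

theorem repl_spacefree_append (w b : List Char) :
    ∀ m v, ' ' ∉ m → repl (' ' :: w) (' ' :: b) (m ++ v) = m ++ repl (' ' :: w) (' ' :: b) v := by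
  intro m
  induction m with
  | nil => simp
  | cons x m ih =>
    intro v hsp
    have hx : x ≠ ' ' := fun h => hsp (by simp [h])
    rw [List.cons_append, repl, if_neg]
    · rw [ih v (fun h => hsp (List.mem_cons_of_mem _ h))]; simp
    · intro h
      exact hx ((List.cons_prefix_cons.mp (List.isPrefixOf_iff_prefix.mp h)).1).symm

theorem prefix_of_append_not (b x q : List Char) (h1 : ¬ q <+: b) (h2 : ¬ b <+: q) :
    ¬ q <+: b ++ x := by
  intro h
  rcases List.prefix_or_prefix_of_prefix h (List.prefix_append b x) with h' | h'
  · exact h1 h'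
  · exact h2 h'

theorem step_absorb (w b : List Char) (rest : List (List Char × List Char))
    (hb : ' ' ∉ b)
    (hrest : ∀ p ∈ rest, p.1 ≠ [] ∧ ' ' ∉ p.1)
    (hpair : List.Pairwise (fun p q => ¬ p.1 <+: q.1 ∧ ¬ q.1 <+: p.1) rest)
    (hcross : ∀ p ∈ rest, ¬ p.1 <+: b ∧ ¬ b <+: p.1) :
    ∀ s, scanGo rest (repl (' ' :: w) (' ' :: b) s) = scanGo ((w, b) :: rest) s := by
  suffices h : ∀ n s, s.length ≤ n →
      scanGo rest (repl (' ' :: w) (' ' :: b) s) = scanGo ((w, b) :: rest) s by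
    intro s; exact h s.length s le_rfl
  intro n
  induction n with
  | zero =>
    intro s hs
    have : s = [] := List.eq_nil_of_length_eq_zero (Nat.le_zero.mp hs)
    subst this
    rw [repl_nil, scanGo_nil, scanGo_nil]
  | succ n ih =>
    intro s hs
    match s with
    | [] => rw [repl_nil, scanGo_nil, scanGo_nil]
    | c :: t =>
      have ht : t.length ≤ n := by simpa using hs
      by_cases hc : c = ' '
      · subst hc
        by_cases hw : w.isPrefixOf t
        · -- the head word matches right after the space
          obtain ⟨u, rfl⟩ : ∃ u, w ++ u = t := List.isPrefixOf_iff_prefix.mp hw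
          have hu : u.length ≤ n := le_trans (by simp) ht
          rw [repl_cons, if_pos (by simpa [List.isPrefixOf_cons₂] using hw)]
          rw [show List.drop ((' ' :: w).length - 1) (w ++ u) = u by simp]
          have hnone : rest.find? (fun q => q.1.isPrefixOf (b ++ repl (' ' :: w) (' ' :: b) u)) = none := by
            apply List.find?_eq_none.mpr
            intro p hp
            simp only [Bool.not_eq_true, ← Bool.not_eq_true, List.isPrefixOf_iff_prefix]
            intro hpre
            exact prefix_of_append_not _ _ _ (hcross p hp).1 (hcross p hp).2 (by simpa using hpre)
          rw [show (' ' :: b) ++ repl (' ' :: w) (' ' :: b) u = ' ' :: (b ++ repl (' ' :: w) (' ' :: b) u) by simp]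
          rw [scanGo_space_none rest _ hnone]
          rw [scanGo_spacefree_append rest b _ hb]
          rw [scanGo_space_some ((w, b) :: rest) (w ++ u) (w, b)
              (List.find?_cons_of_pos (by simpa [List.isPrefixOf_iff_prefix] using List.prefix_append w u))]
          rw [show List.drop ((w, b).1.length) (w ++ u) = u by simp]
          rw [ih u hu]
        · -- the head word does not match: the replace pass keeps this position
          rw [repl_cons, if_neg (by simpa [List.isPrefixOf_cons₂] using hw)]
          cases hfind : rest.find? (fun p => p.1.isPrefixOf t) with
          | none =>
            have hnone2 : rest.find? (fun p => p.1.isPrefixOf (repl (' ' :: w) (' ' :: b) t)) = none := by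
              apply List.find?_eq_none.mpr
              intro p hp
              have hfail := List.find?_eq_none.mp hfind p hp
              simp only [Bool.not_eq_true, List.isPrefixOf_iff_prefix] at *
              intro hpre
              exact hfail ((prefix_repl_iff w b t p.1 (hrest p hp).1 (hrest p hp).2).mp hpre)
            rw [scanGo_space_none rest _ hnone2]
            rw [scanGo_space_none ((w, b) :: rest) t
                (by rw [List.find?_cons_of_neg (by simpa using hw)]; exact hfind)]
            rw [ih t ht]
          | some p =>
            obtain ⟨hp_pred, r1, r2, hsplit, hfail⟩ := List.find?_eq_some_iff_append.mp hfind
            have hpmem : p ∈ rest := by rw [hsplit]; simp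
            obtain ⟨u, rfl⟩ : ∃ u, p.1 ++ u = t := List.isPrefixOf_iff_prefix.mp hp_pred
            have hu : u.length ≤ n := le_trans (by simp) ht
            have hrepl : repl (' ' :: w) (' ' :: b) (p.1 ++ u) = p.1 ++ repl (' ' :: w) (' ' :: b) u :=
              repl_spacefree_append w b p.1 u (hrest p hpmem).2
            have hsome2 : rest.find? (fun q => q.1.isPrefixOf (repl (' ' :: w) (' ' :: b) (p.1 ++ u))) = some p := by
              rw [hrepl]
              apply List.find?_eq_some_iff_append.mpr
              refine ⟨by simpa [List.isPrefixOf_iff_prefix] using List.prefix_append p.1 _, r1, r2, hsplit, ?_⟩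
              intro q hq
              have hqp : ¬ q.1 <+: p.1 ∧ ¬ p.1 <+: q.1 := by
                have hpw := hpair
                rw [hsplit, List.pairwise_append] at hpw
                exact (hpw.2.2 q hq p (by simp))
              simpa [Bool.eq_false_iff, ne_eq, List.isPrefixOf_iff_prefix] using
                prefix_of_append_not p.1 (repl (' ' :: w) (' ' :: b) u) q.1 hqp.1 hqp.2
            rw [scanGo_space_some rest _ p hsome2]
            rw [scanGo_space_some ((w, b) :: rest) (p.1 ++ u) p
                (by rw [List.find?_cons_of_neg (by simpa using hw)]; exact hfind)]
            rw [hrepl]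
            rw [show List.drop p.1.length (p.1 ++ repl (' ' :: w) (' ' :: b) u) = repl (' ' :: w) (' ' :: b) u by simp]
            rw [show List.drop p.1.length (p.1 ++ u) = u by simp]
            rw [ih u hu]
      · -- ordinary character: both sides copy it
        rw [repl_cons, if_neg (by simp [List.isPrefixOf_cons₂, Ne.symm hc])]
        rw [scanGo_cons_nonspace rest c hc, scanGo_cons_nonspace _ c hc, ih t ht]

def GoodTbl (tbl : List (List Char × List Char)) : Prop :=
  (∀ p ∈ tbl, p.1 ≠ [] ∧ ' ' ∉ p.1 ∧ ' ' ∉ p.2) ∧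
  List.Pairwise (fun p q => (¬ p.1 <+: q.1 ∧ ¬ q.1 <+: p.1) ∧ (¬ q.1 <+: p.2 ∧ ¬ p.2 <+: q.1)) tbl

theorem absorb_all : ∀ (tbl : List (List Char × List Char)), GoodTbl tbl → ∀ s,
    scanGo [] (tbl.foldl (fun s p => repl (' ' :: p.1) (' ' :: p.2) s) s) = scanGo tbl s := by
  intro tbl
  induction tbl with
  | nil => intro _ s; rfl
  | cons p rest ih =>
    obtain ⟨w, b⟩ := p
    intro hgood s
    obtain ⟨hall, hpw⟩ := hgood
    rw [List.pairwise_cons] at hpw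
    rw [List.foldl_cons]
    rw [ih ⟨fun q hq => hall q (List.mem_cons_of_mem _ hq), hpw.2⟩]
    exact step_absorb w b rest (hall (w, b) (by simp)).2.2
      (fun q hq => ⟨(hall q (List.mem_cons_of_mem _ hq)).1, (hall q (List.mem_cons_of_mem _ hq)).2.1⟩)
      (hpw.2.imp (fun h => h.1))
      (fun q hq => (hpw.1 q hq).2) s

theorem good_abbrevTable : GoodTbl abbrevTable := by
  unfold GoodTbl abbrevTable
  decide

theorem pre_eq (s : List Char) :
    PySem.Chars.replace (PySem.Chars.replace s ['.'] []) [','] [] =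
      s.filter (fun c => !(c == '.' || c == ',')) := by
  rw [replace_eq_repl _ _ _ (by simp), replace_eq_repl _ _ _ (by simp)]
  rw [repl_single_empty, repl_single_empty, List.filter_filter]
  apply List.filter_congr
  intro a _
  cases h1 : (a == '.') <;> cases h2 : (a == ',') <;> simp [h1, h2]

theorem foldl_replace_toList : ∀ (L : List (String × String)) (s : String),
    (L.foldl (fun s p => PySem.Str.replace s p.1 p.2) s).toList =
      (L.map (fun p => (p.1.toList, p.2.toList))).foldl
        (fun s p => PySem.Chars.replace s p.1 p.2) s.toList := by
  intro L
  induction L with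
  | nil => intro s; simp
  | cons p L ih =>
    intro s
    rw [List.foldl_cons, List.map_cons, List.foldl_cons, ih]
    simp [PySem.Str.toList_replace]

theorem final (a : String) : normalize_addr a = normalize_addr_alt a := by
  unfold normalize_addr normalize_addr_alt
  apply String.toList_injective  -- name?
  rw [foldl_replace_toList]
  simp only [PySem.Str.toList_replace, PySem.Str.toList_strip, PySem.Str.toList_lower,
    String.toList_ofList, List.map]
  rw [show (".").toList = ['.'] from rfl, show (",").toList = [','] from rfl,
      show ("").toList = ([] : List Char) from rfl]
  rw [pre_eq]
  rw [← absorb_all abbrevTable good_abbrevTable]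
  rw [scanGo_nil_table]
  simp only [abbrevTable, List.foldl_cons, List.foldl_nil]
  rw [show (" boulevard").toList = ' ' :: ("boulevard".toList) from rfl,
      show (" blvd").toList = ' ' :: ("blvd".toList) from rfl,
      show (" terrace").toList = ' ' :: ("terrace".toList) from rfl,
      show (" ter").toList = ' ' :: ("ter".toList) from rfl,
      show (" avenue").toList = ' ' :: ("avenue".toList) from rfl,
      show (" ave").toList = ' ' :: ("ave".toList) from rfl,
      show (" street").toList = ' ' :: ("street".toList) from rfl,
      show (" st").toList = ' ' :: ("st".toList) from rfl,
      show (" drive").toList = ' ' :: ("drive".toList) from rfl,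
      show (" dr").toList = ' ' :: ("dr".toList) from rfl,
      show (" court").toList = ' ' :: ("court".toList) from rfl,
      show (" ct").toList = ' ' :: ("ct".toList) from rfl,
      show (" place").toList = ' ' :: ("place".toList) from rfl,
      show (" pl").toList = ' ' :: ("pl".toList) from rfl,
      show (" lane").toList = ' ' :: ("lane".toList) from rfl,
      show (" ln").toList = ' ' :: ("ln".toList) from rfl,
      show (" road").toList = ' ' :: ("road".toList) from rfl,
      show (" rd").toList = ' ' :: ("rd".toList) from rfl,
      show (" circle").toList = ' ' :: ("circle".toList) from rfl,
      show (" cir").toList = ' ' :: ("cir".toList) from rfl,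
      show (" highway").toList = ' ' :: ("highway".toList) from rfl,
      show (" hwy").toList = ' ' :: ("hwy".toList) from rfl,
      show (" parkway").toList = ' ' :: ("parkway".toList) from rfl,
      show (" pkwy").toList = ' ' :: ("pkwy".toList) from rfl,
      show (" square").toList = ' ' :: ("square".toList) from rfl,
      show (" sq").toList = ' ' :: ("sq".toList) from rfl]
  simp only [replace_eq_repl']

-- ===== VERDICT (by name: the statement is the Claim_ definition above) =====
theorem normalize_addr_spec : Claim_equal_normalize_addr := by
  unfold Claim_equal_normalize_addr
  intro a _
  unfold Spec_normalize_addr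
  exact final a
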